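-- pv_equiv track=rewrite | github.com/Thalisu/learning | python/ex 2.py | remove_more_than_two_repetitions
-- ===== SOURCE A (Python) =====
-- def remove_more_than_two_repetitions(text: str):
--     repetitions = 0
--     newText = ""
--     for character in text:
--         if character == newText[-1] if newText else None:
--             repetitions += 1
--         else:
--             repetitions = 1
--         if repetitions <= 2:
--             newText += character
--     return newText
-- ===== SOURCE B (Python) =====
-- def remove_more_than_two_repetitions(text: str):
--     pieces = []
--     i = 0
--     n = len(text)
--     while i < n:
--         j = i
--         while j < n and text[j] == text[i]:
--             j += 1
--         pieces.append(text[i:min(j, i + 2)])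
--         i = j
--     return "".join(pieces)
-- ===== Notes on version B (the rewrite author's own statement) =====
-- stated objective: alternative
-- what changed: B segments the string into maximal runs of equal characters and emits at most two characters per run, instead of A's char-by-char loop maintaining a repetition counter and comparing against the last appended character.
import Mathlib
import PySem

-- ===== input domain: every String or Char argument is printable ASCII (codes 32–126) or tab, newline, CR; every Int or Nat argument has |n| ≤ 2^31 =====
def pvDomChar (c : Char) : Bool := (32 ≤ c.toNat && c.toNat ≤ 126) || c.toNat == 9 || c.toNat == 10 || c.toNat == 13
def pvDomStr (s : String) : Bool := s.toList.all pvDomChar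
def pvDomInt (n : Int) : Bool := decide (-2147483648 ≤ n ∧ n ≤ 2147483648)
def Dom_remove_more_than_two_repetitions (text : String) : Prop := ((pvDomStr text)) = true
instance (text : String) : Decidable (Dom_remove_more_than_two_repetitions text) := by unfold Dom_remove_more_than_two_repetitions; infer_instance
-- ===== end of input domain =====

-- B replaces A's char-by-char loop (repetition counter + last-appended-char comparison) by
-- run segmentation: split into maximal runs of equal characters, keep at most two per run.

-- ===== PORT A =====
-- loop body: 'character == (newText[-1] if newText else None)' — comparison with None is False,
-- and newText[-1] on a nonempty string is its last character (getLast?); exact.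
def pvStepA (st : Int × List Char) (character : Char) : Int × List Char :=
  let repetitions : Int :=
    if (match st.2.getLast? with | some l => character == l | none => false) then st.1 + 1 else 1
  (repetitions, if repetitions ≤ 2 then st.2 ++ [character] else st.2)

def remove_more_than_two_repetitions (text : String) : String :=
  String.mk ((text.toList.foldl pvStepA ((0 : Int), ([] : List Char))).2)

-- ===== PORT B =====
-- Source B's outer while loop over runs: the inner 'while text[j] == text[i]' is takeWhile,
-- 'text[i:min(j, i+2)]' is take 2 of the run, 'i = j' is dropWhile; exact.
def pvRunsB : List Char → List Char
  | [] => []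
  | c :: rest =>
      (c :: rest.takeWhile (· == c)).take 2 ++ pvRunsB (rest.dropWhile (· == c))
termination_by l => l.length
decreasing_by
  simp only [List.length_cons]
  have := List.length_dropWhile_le (· == c) rest
  omega

def remove_more_than_two_repetitions_alt (text : String) : String :=
  String.mk (pvRunsB text.toList)

-- ===== PRECONDITION & SPEC =====
def Spec_remove_more_than_two_repetitions (text : String) (out : String) : Prop := out = remove_more_than_two_repetitions_alt text
instance (text : String) (out : String) : Decidable (Spec_remove_more_than_two_repetitions text out) := by unfold Spec_remove_more_than_two_repetitions; infer_instance

-- ===== CLAIM (what is proved, stated in full; the proofs are below) =====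
def Claim_equal_remove_more_than_two_repetitions : Prop := ∀ (text : String), Dom_remove_more_than_two_repetitions text → Spec_remove_more_than_two_repetitions text (remove_more_than_two_repetitions text)

-- ===== LEMMAS AND PROOFS =====

-- Folding A's step over a continuation of a run: acc already ends with c and the counter is r ≥ 1;
-- the counter increments per character and only the first (2 - r) characters are appended.
theorem pv_runA (run : List Char) (r : Int) (acc : List Char) (c : Char)
    (hall : ∀ d ∈ run, d = c) (hlast : acc.getLast? = some c) (hr : 1 ≤ r) :
    run.foldl pvStepA (r, acc) = (r + run.length, acc ++ run.take (2 - r).toNat) := by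
  induction run generalizing r acc with
  | nil => simp
  | cons d rest ih =>
    have hd : d = c := hall d (by simp)
    subst hd
    simp only [List.foldl_cons, pvStepA, hlast, beq_self_eq_true, if_true]
    by_cases h2 : r + 1 ≤ 2
    · have hr1 : r = 1 := by omega
      subst hr1
      rw [if_pos (by norm_num)]
      rw [show (1:Int) + 1 = 2 from by norm_num]
      rw [ih 2 (acc ++ [d]) (fun x hx => hall x (by simp [hx])) (by simp) (by norm_num)]
      simp [List.length_cons]
      ring
    · rw [if_neg h2]
      rw [ih (r + 1) acc (fun x hx => hall x (by simp [hx])) hlast (by omega)]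
      have h0 : ((2 : Int) - (r + 1)).toNat = 0 := by omega
      have h0' : ((2 : Int) - r).toNat = 0 := by omega
      simp [h0, h0', List.length_cons]
      ring

-- Main invariant: starting a fresh run (acc does not end with the head of l),
-- A's fold appends exactly B's run-capped output.
theorem pv_mainA (l : List Char) (acc : List Char) (r : Int)
    (h : ∀ c, l.head? = some c → acc.getLast? ≠ some c) :
    (l.foldl pvStepA (r, acc)).2 = acc ++ pvRunsB l := by
  match l with
  | [] => simp [pvRunsB]
  | c :: rest =>
    have hne : acc.getLast? ≠ some c := h c rfl
    have hstep : pvStepA (r, acc) c = (1, acc ++ [c]) := by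
      simp only [pvStepA]
      have : (match acc.getLast? with | some l => c == l | none => false) = false := by
        cases hA : acc.getLast? with
        | none => rfl
        | some l =>
          simp only [beq_eq_false_iff_ne, ne_eq]
          intro hcl; exact hne (hcl ▸ hA)
      rw [this]
      norm_num
    set run := rest.takeWhile (· == c) with hrun
    set rest' := rest.dropWhile (· == c) with hrest'
    have hall : ∀ d ∈ run, d = c := by
      intro d hd
      have := List.mem_takeWhile_imp hd
      simpa [beq_iff_eq] using this
    have hsplit : rest = run ++ rest' := (List.takeWhile_append_dropWhile (p := (· == c)) (l := rest)).symm
    have hfold : List.foldl pvStepA (r, acc) (c :: rest)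
        = List.foldl pvStepA (1, acc ++ [c]) (run ++ rest') := by
      rw [List.foldl_cons, hstep, ← hsplit]
    rw [hfold, List.foldl_append]
    rw [pv_runA run 1 (acc ++ [c]) c hall (by simp) (by norm_num)]
    have htake1 : ((2 : Int) - 1).toNat = 1 := by decide
    rw [htake1]
    -- last char of acc ++ [c] ++ run.take 1 is c
    have hlastc : (acc ++ [c] ++ run.take 1).getLast? = some c := by
      cases hR : run with
      | nil => simp
      | cons d tl =>
        have hd : d = c := hall d (by rw [hR]; simp)
        simp [List.take, hd]
    have hne' : ∀ c', rest'.head? = some c' → (acc ++ [c] ++ run.take 1).getLast? ≠ some c' := by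
      intro c' hc'
      have hpc : (c' == c) = false := by
        have hfind := List.find?_not_eq_head?_dropWhile (p := (· == c)) (l := rest)
        rw [← hrest', hc'] at hfind
        have := List.find?_some hfind
        simpa using this
      rw [hlastc]
      intro hEq
      have : c = c' := by injection hEq
      subst this
      simp at hpc
    have := pv_mainA rest' (acc ++ [c] ++ run.take 1) (1 + run.length) hne'
    rw [this]
    show acc ++ [c] ++ run.take 1 ++ pvRunsB rest' = acc ++ pvRunsB (c :: rest)
    rw [pvRunsB]
    simp [hrun, hrest', List.append_assoc]
  termination_by l.length
  decreasing_by
    simp only [List.length_cons]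
    have h1 := List.length_dropWhile_le (· == c) rest
    omega

-- ===== VERDICT (by name: the statement is the Claim_ definition above) =====
theorem remove_more_than_two_repetitions_spec : Claim_equal_remove_more_than_two_repetitions := by
  intro text _
  show remove_more_than_two_repetitions text = remove_more_than_two_repetitions_alt text
  unfold remove_more_than_two_repetitions remove_more_than_two_repetitions_alt
  rw [pv_mainA text.toList [] 0 (by intro c hc; simp)]
  simp
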